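-- pv_equiv track=rewrite | github.com/Merlinhool/Machine-Learning-Code | CWS/separate.py | getSet
-- ===== SOURCE A (Python) =====
-- def getSet(p):
--     start = end = 0
--     ans = set()
--     for i in p:
--         end = start + len(i)
--         ans.add((start, end))
--         start = end
--     return ans
-- ===== SOURCE B (Python) =====
-- def getSet(p):
--     # table-then-pair: build the full prefix-sum offset table, then pair adjacent offsets
--     offsets = [0]
--     for s in p:
--         offsets.append(offsets[-1] + len(s))
--     return set(zip(offsets, offsets[1:]))
-- ===== Notes on version B (the rewrite author's own statement) =====
-- stated objective: simpler
-- what changed: Replaces the stateful start/end running-accumulator loop that inserts into the set as it goes with a prefix-sum offset table built first and a separate adjacent-pairing pass (set(zip(offsets, offsets[1:]))).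
import Mathlib
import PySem

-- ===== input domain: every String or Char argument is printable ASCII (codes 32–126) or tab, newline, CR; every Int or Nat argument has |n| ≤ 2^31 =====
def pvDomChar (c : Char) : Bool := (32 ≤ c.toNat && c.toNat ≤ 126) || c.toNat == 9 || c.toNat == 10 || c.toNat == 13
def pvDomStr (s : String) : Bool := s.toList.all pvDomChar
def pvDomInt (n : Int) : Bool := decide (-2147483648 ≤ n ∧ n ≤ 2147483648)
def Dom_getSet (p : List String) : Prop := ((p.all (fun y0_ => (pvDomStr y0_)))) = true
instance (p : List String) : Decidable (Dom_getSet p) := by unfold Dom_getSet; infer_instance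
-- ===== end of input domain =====

-- B builds the prefix-sum offset table first and then pairs adjacent offsets, instead of A's
-- stateful running accumulator inserting into the set as it goes (same cost, simpler decomposition).

-- ===== PORT A =====
def getSet (p : List String) : List (Int × Int) :=
  (p.foldl
    (fun (st : Int × PySem.Set (Int × Int)) i =>
      let e := st.1 + PySem.Str.len i
      (e, PySem.Set.add st.2 (st.1, e)))
    (0, PySem.Set.empty)).2

-- ===== PORT B =====
def getSet_alt (p : List String) : List (Int × Int) :=
  let offsets := p.foldl
    (fun acc s => acc ++ [PySem.List.pyGetD acc (-1) 0 + PySem.Str.len s]) [0]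
  PySem.Set.ofList (offsets.zip (offsets.drop 1))

-- ===== PRECONDITION & SPEC =====
def Spec_getSet (p : List String) (out : List (Int × Int)) : Prop := out = getSet_alt p
instance (p : List String) (out : List (Int × Int)) : Decidable (Spec_getSet p out) := by unfold Spec_getSet; infer_instance

-- ===== CLAIM (what is proved, stated in full; the proofs are below) =====
def Claim_equal_getSet : Prop := ∀ (p : List String), Dom_getSet p → Spec_getSet p (getSet p)

-- ===== LEMMAS AND PROOFS =====

/-- The list of intervals produced from start offset `s`, in production order. -/
def pairsList (s : Int) : List String → List (Int × Int)
  | [] => []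
  | i :: t => (s, s + PySem.Str.len i) :: pairsList (s + PySem.Str.len i) t

/-- The offsets after the first, starting from `s`. -/
def tailOffsets (s : Int) : List String → List Int
  | [] => []
  | i :: t => (s + PySem.Str.len i) :: tailOffsets (s + PySem.Str.len i) t

lemma foldA (p : List String) : ∀ (s : Int) (ans : PySem.Set (Int × Int)),
    (p.foldl
      (fun (st : Int × PySem.Set (Int × Int)) i =>
        let e := st.1 + PySem.Str.len i
        (e, PySem.Set.add st.2 (st.1, e)))
      (s, ans)).2 = (pairsList s p).foldl PySem.Set.add ans := by
  induction p with
  | nil => intro s ans; simp [pairsList]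
  | cons i t ih =>
    intro s ans
    simpa [pairsList] using ih (s + PySem.Str.len i) (PySem.Set.add ans (s, s + PySem.Str.len i))

lemma foldB (p : List String) : ∀ (pre : List Int) (e : Int),
    p.foldl (fun acc s => acc ++ [PySem.List.pyGetD acc (-1) 0 + PySem.Str.len s]) (pre ++ [e])
      = pre ++ e :: tailOffsets e p := by
  induction p with
  | nil => intro pre e; simp [tailOffsets]
  | cons i t ih =>
    intro pre e
    have hlast : PySem.List.pyGetD (pre ++ [e]) (-1) 0 = e := by
      simp [PySem.List.pyGetD, PySem.List.pyGet?_neg_one]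
    simp only [List.foldl, hlast, tailOffsets]
    have := ih (pre ++ [e]) (e + PySem.Str.len i)
    simpa using this

lemma zip_tailOffsets (p : List String) : ∀ (s : Int),
    (s :: tailOffsets s p).zip (tailOffsets s p) = pairsList s p := by
  induction p with
  | nil => intro s; simp [tailOffsets, pairsList]
  | cons i t ih =>
    intro s
    simp only [tailOffsets, pairsList, List.zip, List.zipWith]
    exact congrArg _ (ih (s + PySem.Str.len i))

-- ===== VERDICT (by name: the statement is the Claim_ definition above) =====
theorem getSet_spec : Claim_equal_getSet := by
  intro p _
  show getSet p = getSet_alt p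
  have hB := foldB p [] 0
  simp only [List.nil_append] at hB
  simp only [getSet, getSet_alt]
  rw [foldA, hB, List.drop_one, List.tail_cons, zip_tailOffsets, PySem.Set.ofList_eq_foldl]
  rfl
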